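-- pv_equiv track=rewrite | github.com/philliphandel/pythontest | Stundenrechner.py | _prepare_inp
-- ===== SOURCE A (Python) =====
-- NUMBERS = ["1", "2", "3", "4", "5", "6", "7", "8", "9", "0"]
--
-- def _prepare_inp(string):
--     string = string.replace(".", ":")
--     string = string.replace(",", ":")
--     string = string.replace(";", ":")
--     string = string.replace("-", ":")
--     string = string.replace("_", ":")
--
--     last = False
--     newstring = ""
--     for char in string:
--         if char == ":":
--             if not last:
--                 newstring += char
--                 last = True
--         else:
--             last = False
--             if char in NUMBERS:
--                 newstring += char
--
--     return newstring
-- ===== SOURCE B (Python) =====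
-- def _prepare_inp(string):
--     # pass 1: unify all separators into ':'
--     s = ''.join(':' if c in '.,;-_' else c for c in string)
--     # pass 2: collapse runs of ':' by dropping a ':' whose predecessor is ':'
--     collapsed = ''.join(cur for prev, cur in zip(' ' + s, s)
--                         if not (prev == ':' and cur == ':'))
--     # pass 3: keep only digits and colons
--     return ''.join(c for c in collapsed if c in '0123456789:')
-- ===== Notes on version B (the rewrite author's own statement) =====
-- stated objective: simpler
-- what changed: A's single interleaved state machine (a 'last' flag deciding both colon-collapsing and digit filtering) is decomposed into three independent passes: map each separator character to a colon, drop a colon whose predecessor is a colon via zip with the shifted string, then filter to digits and colons.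
import Mathlib
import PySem

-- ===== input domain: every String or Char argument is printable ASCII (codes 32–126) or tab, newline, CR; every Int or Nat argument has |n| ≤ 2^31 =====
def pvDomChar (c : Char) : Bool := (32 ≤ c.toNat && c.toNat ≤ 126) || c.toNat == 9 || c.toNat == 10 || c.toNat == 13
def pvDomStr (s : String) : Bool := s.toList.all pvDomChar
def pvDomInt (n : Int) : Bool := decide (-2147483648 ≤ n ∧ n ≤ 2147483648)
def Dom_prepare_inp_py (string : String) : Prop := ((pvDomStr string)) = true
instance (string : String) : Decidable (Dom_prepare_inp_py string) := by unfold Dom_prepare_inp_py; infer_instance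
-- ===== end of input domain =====

-- B decomposes A's interleaved state machine into three independent passes; same cost, simpler.

-- ===== PORT A =====
-- NUMBERS is a list of one-character Python strings; under the type convention the
-- characters iterated from the string are Char, so membership is tested on Char.
def pvNUMBERS : List Char := ['1', '2', '3', '4', '5', '6', '7', '8', '9', '0']

def prepare_inp_py (string : String) : String :=
  let s1 := PySem.Str.replace string "." ":"
  let s2 := PySem.Str.replace s1 "," ":"
  let s3 := PySem.Str.replace s2 ";" ":"
  let s4 := PySem.Str.replace s3 "-" ":"
  let s5 := PySem.Str.replace s4 "_" ":"
  -- for char in string: the interleaved 'last' state machine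
  let r := s5.toList.foldl
    (fun (st : Bool × List Char) c =>
      if c = ':' then
        (if st.1 = false then (true, st.2 ++ [c]) else st)
      else
        (false, if c ∈ pvNUMBERS then st.2 ++ [c] else st.2))
    (false, [])
  String.ofList r.2

-- ===== PORT B =====
def prepare_inp_py_alt (string : String) : String :=
  -- pass 1: unify separators into ':'
  let s := string.toList.map (fun c => if c ∈ ['.', ',', ';', '-', '_'] then ':' else c)
  -- pass 2: zip(' ' + s, s); drop a ':' whose predecessor is ':'
  let collapsed := (((' ' :: s).zip s).filter
    (fun p => ¬ (p.1 = ':' ∧ p.2 = ':'))).map (·.2)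
  -- pass 3: keep only digits and colons
  String.ofList (collapsed.filter (fun c => c ∈ "0123456789:".toList))

-- ===== PRECONDITION & SPEC =====
def Spec_prepare_inp_py (string : String) (out : String) : Prop := out = prepare_inp_py_alt string
instance (string : String) (out : String) : Decidable (Spec_prepare_inp_py string out) := by unfold Spec_prepare_inp_py; infer_instance

-- ===== CLAIM (what is proved, stated in full; the proofs are below) =====
def Claim_equal_prepare_inp_py : Prop := ∀ (string : String), Dom_prepare_inp_py string → Spec_prepare_inp_py string (prepare_inp_py string)

-- ===== LEMMAS AND PROOFS =====

-- str.replace with one-character old/new is a map over the characters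
theorem go_single (a b : Char) : ∀ (l : List Char) (fuel : Nat) (acc : List Char),
    l.length ≤ fuel →
    PySem.Chars.replace.go [a] [b] fuel l acc
      = acc.reverse ++ l.map (fun c => if c = a then b else c) := by
  intro l
  induction l with
  | nil =>
    intro fuel acc _
    cases fuel <;> simp [PySem.Chars.replace.go]
  | cons c t ih =>
    intro fuel acc h
    cases fuel with
    | zero => simp at h
    | succ f =>
      simp only [PySem.Chars.replace.go]
      by_cases hc : c = a
      · subst hc
        simp only [List.isPrefixOf, BEq.rfl, Bool.true_and, if_pos]
        simp only [List.length_cons, List.length_nil, List.drop_succ_cons, List.drop_zero]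
        rw [ih f (List.reverse [b] ++ acc) (by simpa using Nat.le_of_succ_le_succ h)]
        simp
      · have : [a].isPrefixOf (c :: t) = false := by
          simp [List.isPrefixOf]
          intro hh; exact absurd hh.symm hc
        rw [if_neg (by simp [this])]
        rw [ih f (c :: acc) (by simpa using Nat.le_of_succ_le_succ h)]
        simp [hc]

theorem replace_single (a b : Char) (l : List Char) :
    PySem.Chars.replace l [a] [b] = l.map (fun c => if c = a then b else c) := by
  simp only [PySem.Chars.replace, List.isEmpty_cons]
  rw [if_neg (by simp)]
  simpa using go_single a b l l.length [] le_rfl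

-- the five single-character replaces compose into B's one map
theorem five_replaces (l : List Char) :
    (((((l.map (fun c => if c = '.' then ':' else c)).map
        (fun c => if c = ',' then ':' else c)).map
        (fun c => if c = ';' then ':' else c)).map
        (fun c => if c = '-' then ':' else c)).map
        (fun c => if c = '_' then ':' else c))
      = l.map (fun c => if c ∈ ['.', ',', ';', '-', '_'] then ':' else c) := by
  simp only [List.map_map]
  apply List.map_congr_left
  intro c _
  simp only [Function.comp_apply, List.mem_cons, List.not_mem_nil, or_false]
  split_ifs <;> simp_all

-- A's state machine over s (with 'last' = "previous char is ':'") equals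
-- B's collapse-then-filter of s
theorem main_loop (l : List Char) : ∀ (p : Char) (acc : List Char),
    (l.foldl
      (fun (st : Bool × List Char) c =>
        if c = ':' then
          (if st.1 = false then (true, st.2 ++ [c]) else st)
        else
          (false, if c ∈ pvNUMBERS then st.2 ++ [c] else st.2))
      (decide (p = ':'), acc)).2
    = acc ++ ((((p :: l).zip l).filter
        (fun q => ¬ (q.1 = ':' ∧ q.2 = ':'))).map (·.2)).filter
        (fun c => c ∈ "0123456789:".toList) := by
  have hs : "0123456789:".toList = ['0','1','2','3','4','5','6','7','8','9',':'] := by decide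
  simp only [hs]
  induction l with
  | nil => intro p acc; simp
  | cons c t ih =>
    intro p acc
    simp only [List.foldl_cons, List.zip_cons_cons, List.filter_cons]
    by_cases hc : c = ':'
    · subst hc
      by_cases hp : p = ':'
      · subst hp
        have h := ih ':' acc
        simp at h ⊢
        exact h
      · have h := ih ':' (acc ++ [':'])
        simp [hp] at h ⊢
        exact h
    · by_cases hd : c ∈ pvNUMBERS
      · have h := ih c (acc ++ [c])
        simp only [pvNUMBERS, List.mem_cons, List.not_mem_nil, or_false] at hd
        rcases hd with hcc|hcc|hcc|hcc|hcc|hcc|hcc|hcc|hcc|hcc <;> subst hcc <;>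
          (simp [pvNUMBERS] at h ⊢; exact h)
      · have hdig : ¬(c = '0' ∨ c = '1' ∨ c = '2' ∨ c = '3' ∨ c = '4' ∨ c = '5' ∨ c = '6'
            ∨ c = '7' ∨ c = '8' ∨ c = '9' ∨ c = ':') := by
          intro hmem
          rcases hmem with h|h|h|h|h|h|h|h|h|h|h <;>
            first
              | exact hc h
              | exact hd (by rw [h]; decide)
        push Not at hdig
        obtain ⟨h0, h1, h2, h3, h4, h5, h6, h7, h8, h9, h10⟩ := hdig
        have h := ih c acc
        simp [hc, hd, h0, h1, h2, h3, h4, h5, h6, h7, h8, h9] at h ⊢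
        exact h

-- ===== VERDICT (by name: the statement is the Claim_ definition above) =====
theorem prepare_inp_py_spec : Claim_equal_prepare_inp_py := by
  intro string _
  unfold Spec_prepare_inp_py prepare_inp_py prepare_inp_py_alt
  simp only [PySem.Str.replace, String.toList_ofList,
    show (".".toList) = ['.'] from rfl, show (",".toList) = [','] from rfl,
    show (";".toList) = [';'] from rfl, show ("-".toList) = ['-'] from rfl,
    show ("_".toList) = ['_'] from rfl, show (":".toList) = [':'] from rfl]
  rw [replace_single, replace_single, replace_single, replace_single, replace_single]
  rw [five_replaces]
  congr 1
  have h := main_loop (string.toList.map (fun c => if c ∈ ['.', ',', ';', '-', '_'] then ':' else c))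
    ' ' []
  simpa using h
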